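-- pv_equiv track=rewrite | github.com/mmprotest/villani-code | villani_code/benchmark/tool_policy.py | parse_benchmark_denial_message
-- ===== SOURCE A (Python) =====
-- def parse_benchmark_denial_message(message: str) -> tuple[str, str | None]:
--     reason = "policy_denied"
--     path: str | None = None
--     for part in message.split():
--         if part.startswith("reason="):
--             reason = part.split("=", 1)[1]
--         if part.startswith("path="):
--             path = part.split("=", 1)[1]
--     return reason, path
-- ===== SOURCE B (Python) =====
-- def parse_benchmark_denial_message(message: str) -> tuple[str, str | None]:
--     d = {}
--     for part in message.split():
--         if "=" in part:
--             key, value = part.split("=", 1)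
--             d[key] = value
--     return d.get("reason", "policy_denied"), d.get("path")
-- ===== Notes on version B (the rewrite author's own statement) =====
-- stated objective: simpler
-- what changed: B parses every key=value token into a dict in one pass (last occurrence wins via overwrite) and then looks up 'reason' and 'path' with defaults, instead of A's per-prefix inline conditionals.
import Mathlib
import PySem

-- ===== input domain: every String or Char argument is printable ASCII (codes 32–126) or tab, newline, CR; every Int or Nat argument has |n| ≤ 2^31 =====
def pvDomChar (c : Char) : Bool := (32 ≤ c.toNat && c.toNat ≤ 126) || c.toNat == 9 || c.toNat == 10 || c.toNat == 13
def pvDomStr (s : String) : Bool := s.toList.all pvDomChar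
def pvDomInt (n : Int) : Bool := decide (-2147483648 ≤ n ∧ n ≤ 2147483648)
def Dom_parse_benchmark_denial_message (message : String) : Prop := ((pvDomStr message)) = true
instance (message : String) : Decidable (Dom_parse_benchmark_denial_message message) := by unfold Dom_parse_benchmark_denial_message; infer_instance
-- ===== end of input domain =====

-- B replaces A's two inline prefix checks by a parse-all-tokens-into-a-dict pass followed by two lookups (objective: simpler).

-- ===== PORT A =====
-- part.split("=", 1)[1]: sep "=" is nonempty so splitMax? is some, and the branch guard
-- guarantees '=' ∈ part, so index 1 is in range — the .getD defaults are never used.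
def parse_benchmark_denial_message (message : String) : String × Option String :=
  (PySem.Str.split₀ message).foldl
    (fun st part =>
      let st1 : String × Option String :=
        if PySem.Str.startswith part "reason=" then
          (((PySem.Str.splitMax? part "=" 1).getD []).getD 1 "", st.2)
        else st
      if PySem.Str.startswith part "path=" then
        (st1.1, some (((PySem.Str.splitMax? part "=" 1).getD []).getD 1 ""))
      else st1)
    ("policy_denied", none)

-- ===== PORT B =====
-- key, value = part.split("=", 1): the guard '"=" in part' guarantees exactly two pieces,
-- so the .getD defaults are never used; d[key] = value is Dict.insert (last wins).
def parse_benchmark_denial_message_alt (message : String) : String × Option String :=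
  let d : PySem.Dict String String :=
    (PySem.Str.split₀ message).foldl
      (fun d part =>
        if PySem.Str.isIn "=" part then
          let pieces := (PySem.Str.splitMax? part "=" 1).getD []
          d.insert (pieces.getD 0 "") (pieces.getD 1 "")
        else d)
      PySem.Dict.empty
  (d.getD "reason" "policy_denied", d.get? "path")

-- ===== PRECONDITION & SPEC =====
def Spec_parse_benchmark_denial_message (message : String) (out : String × Option String) : Prop := out = parse_benchmark_denial_message_alt message
instance (message : String) (out : String × Option String) : Decidable (Spec_parse_benchmark_denial_message message out) := by unfold Spec_parse_benchmark_denial_message; infer_instance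

-- ===== CLAIM (what is proved, stated in full; the proofs are below) =====
def Claim_equal_parse_benchmark_denial_message : Prop := ∀ (message : String), Dom_parse_benchmark_denial_message message → Spec_parse_benchmark_denial_message message (parse_benchmark_denial_message message)

-- ===== LEMMAS AND PROOFS =====

-- proof-only names for the two loop bodies (definitionally equal to the ports' inline lambdas)
def stepA (st : String × Option String) (part : String) : String × Option String :=
  let st1 : String × Option String :=
    if PySem.Str.startswith part "reason=" then
      (((PySem.Str.splitMax? part "=" 1).getD []).getD 1 "", st.2)
    else st
  if PySem.Str.startswith part "path=" then
    (st1.1, some (((PySem.Str.splitMax? part "=" 1).getD []).getD 1 ""))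
  else st1

def stepB (d : PySem.Dict String String) (part : String) : PySem.Dict String String :=
  if PySem.Str.isIn "=" part then
    let pieces := (PySem.Str.splitMax? part "=" 1).getD []
    d.insert (pieces.getD 0 "") (pieces.getD 1 "")
  else d

-- splitOnMax.go with maxsplit exhausted (m = 0) flushes the rest as one final piece.
theorem go_zero (fuel : Nat) (l cur : List Char) (acc : List (List Char)) (h : 0 < fuel) :
    PySem.Chars.splitOnMax.go ['='] fuel 0 l cur acc = ((cur.reverse ++ l) :: acc).reverse := by
  cases fuel with
  | zero => omega
  | succ n =>
    cases l with
    | nil =>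
      rw [PySem.Chars.splitOnMax.go]
      · simp
      · omega
    | cons c rest => rw [PySem.Chars.splitOnMax.go]; simp

-- splitOnMax.go with maxsplit 1 and sep "=": split at the FIRST '=' (if any).
theorem go_one (l : List Char) : ∀ (fuel : Nat) (cur : List Char) (acc : List (List Char)),
    l.length < fuel →
    PySem.Chars.splitOnMax.go ['='] fuel 1 l cur acc =
      if '=' ∈ l then
        acc.reverse ++ [cur.reverse ++ l.takeWhile (fun x => decide (x ≠ '=')),
                        (l.dropWhile (fun x => decide (x ≠ '='))).tail]
      else acc.reverse ++ [cur.reverse ++ l] := by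
  induction l with
  | nil =>
    intro fuel cur acc h
    cases fuel with
    | zero => omega
    | succ n =>
      rw [PySem.Chars.splitOnMax.go]
      · simp
      · omega
  | cons c rest ih =>
    intro fuel cur acc h
    cases fuel with
    | zero => omega
    | succ n =>
      rw [PySem.Chars.splitOnMax.go]
      by_cases hc : c = '='
      · subst hc
        have hpre : (['='].isPrefixOf ('=' :: rest)) = true := by simp [List.isPrefixOf]
        rw [if_neg (by omega : ¬(1 : Nat) = 0), if_pos hpre]
        have hn : 0 < n := by simp at h; omega
        rw [show (1 - 1 : Nat) = 0 from rfl]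
        rw [go_zero n _ _ _ hn]
        simp
      · have hpre : (['='].isPrefixOf (c :: rest)) = false := by
          simp [List.isPrefixOf]
          intro hh
          exact absurd hh.symm hc
        rw [if_neg (by omega : ¬(1 : Nat) = 0), if_neg (by simp [hpre])]
        rw [ih n (c :: cur) acc (by simp at h ⊢; omega)]
        by_cases hm : '=' ∈ rest
        · simp [hm, hc, Ne.symm hc]
        · simp [hm, Ne.symm hc]

-- part.split("=", 1) at the character level.
theorem splitOnMax_eq (cs : List Char) :
    PySem.Chars.splitOnMax cs ['='] 1 =
      if '=' ∈ cs then [cs.takeWhile (fun x => decide (x ≠ '=')),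
                        (cs.dropWhile (fun x => decide (x ≠ '='))).tail]
      else [cs] := by
  unfold PySem.Chars.splitOnMax
  rw [if_neg (by omega)]
  rw [show ((1 : Int).toNat) = 1 from rfl]
  rw [go_one cs (cs.length + 1) [] [] (by omega)]
  split <;> simp

theorem isIn_eq_mem (part : String) :
    PySem.Str.isIn "=" part = true ↔ '=' ∈ part.toList := by
  rw [PySem.Str.isIn_iff_infix]
  exact List.singleton_infix_iff '=' part.toList

-- a prefix ending in '=' needs an '=' in the string
theorem no_eq_no_prefix (cs pre : List Char) (h : '=' ∉ cs) : ¬ (pre ++ ['=']) <+: cs := by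
  intro hp
  exact h (hp.sublist.mem (by simp))

-- with '=' ∈ cs and '=' ∉ pre:  "pre=" is a prefix of cs  ↔  the first '='-field of cs is pre
theorem prefix_iff_takeWhile (cs : List Char) : ∀ (pre : List Char), '=' ∈ cs → '=' ∉ pre →
    ((pre ++ ['=']) <+: cs ↔ cs.takeWhile (fun x => decide (x ≠ '=')) = pre) := by
  induction cs with
  | nil => intro pre h _; simp at h
  | cons c rest ih =>
    intro pre hmem hpre
    rw [List.takeWhile_cons]
    by_cases hc : c = '='
    · subst hc
      rw [if_neg (by simp)]
      cases pre with
      | nil =>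
        constructor
        · intro _; rfl
        · intro _; exact ⟨rest, rfl⟩
      | cons q pre' =>
        have hq : q ≠ '=' := fun h => hpre (by simp [h])
        rw [show ((q :: pre') ++ ['=']) = q :: (pre' ++ ['=']) from rfl, List.cons_prefix_cons]
        constructor
        · rintro ⟨h1, -⟩; exact absurd h1 hq
        · intro h; simp at h
    · have hmem' : '=' ∈ rest := by
        cases hmem with
        | head => exact absurd rfl hc
        | tail _ h => exact h
      rw [if_pos (by simp [hc])]
      cases pre with
      | nil =>
        constructor
        · rintro ⟨t, ht⟩
          simp at ht
          exact absurd ht.1.symm hc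
        · intro h; simp at h
      | cons q pre' =>
        have hq' : '=' ∉ pre' := fun h => hpre (List.mem_cons_of_mem _ h)
        rw [show ((q :: pre') ++ ['=']) = q :: (pre' ++ ['=']) from rfl, List.cons_prefix_cons,
            ih pre' hmem' hq']
        constructor
        · rintro ⟨h1, h2⟩; rw [h1, h2]
        · intro h
          obtain ⟨h1, h2⟩ := List.cons.inj h
          exact ⟨h1.symm, h2⟩

-- pieces of part.split("=", 1) when '=' ∈ part
theorem pieces_eq (part : String) (h : '=' ∈ part.toList) :
    (PySem.Str.splitMax? part "=" 1).getD [] =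
      [String.ofList (part.toList.takeWhile (fun x => decide (x ≠ '='))),
       String.ofList ((part.toList.dropWhile (fun x => decide (x ≠ '='))).tail)] := by
  unfold PySem.Str.splitMax? PySem.Chars.splitMax?
  rw [if_neg (by simp [show ("=" : String).toList = ['='] from rfl])]
  rw [show ("=" : String).toList = ['='] from rfl]
  rw [splitOnMax_eq, if_pos h]
  rfl

-- "part startswith pre=" read off the first '='-field of part
theorem key_iff (part pre preEq : String) (hmem : '=' ∈ part.toList) (hp : '=' ∉ pre.toList)
    (hcat : preEq.toList = pre.toList ++ ['=']) :
    PySem.Str.startswith part preEq = true ↔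
      String.ofList (part.toList.takeWhile (fun x => decide (x ≠ '='))) = pre := by
  rw [PySem.Str.startswith_eq, PySem.Chars.startswith_iff, hcat,
      prefix_iff_takeWhile part.toList pre.toList hmem hp]
  constructor
  · intro h; rw [h]; exact String.ofList_toList
  · intro h
    have := congrArg String.toList h
    simpa using this

-- the per-token step: A's update of (reason, path) equals looking the two keys up in B's updated dict
theorem step_eq (d : PySem.Dict String String) (part : String) :
    stepA (d.getD "reason" "policy_denied", d.get? "path") part
      = ((stepB d part).getD "reason" "policy_denied", (stepB d part).get? "path") := by
  unfold stepA stepB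
  by_cases hin : PySem.Str.isIn "=" part = true
  · have hmem : '=' ∈ part.toList := (isIn_eq_mem part).mp hin
    rw [if_pos hin]
    rw [pieces_eq part hmem]
    simp only [List.getD_cons_zero, List.getD_cons_succ]
    rw [PySem.Dict.getD_insert, PySem.Dict.get?_insert]
    have hr := key_iff part "reason" "reason=" hmem (by decide) (by decide)
    have hpth := key_iff part "path" "path=" hmem (by decide) (by decide)
    by_cases h1 : PySem.Str.startswith part "reason=" = true
    · have hk := hr.mp h1
      have h2 : ¬ PySem.Str.startswith part "path=" = true := by
        intro h2
        have := (hpth.mp h2).symm.trans hk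
        simp at this
      rw [if_pos h1, if_neg h2, if_pos hk.symm,
          if_neg (fun hh => absurd (hh.trans hk) (by decide))]
    · by_cases h2 : PySem.Str.startswith part "path=" = true
      · have hk := hpth.mp h2
        rw [if_neg h1, if_pos h2, if_neg (fun hh => absurd (hh.trans hk) (by decide)),
            if_pos hk.symm]
      · rw [if_neg h1, if_neg h2, if_neg (fun hh => h1 (hr.mpr hh.symm)),
            if_neg (fun hh => h2 (hpth.mpr hh.symm))]
  · rw [if_neg hin]
    have hmem : '=' ∉ part.toList := fun h => hin ((isIn_eq_mem part).mpr h)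
    have h1 : ¬ PySem.Str.startswith part "reason=" = true := by
      rw [PySem.Str.startswith_eq, PySem.Chars.startswith_iff,
          show ("reason=" : String).toList = "reason".toList ++ ['='] by decide]
      exact no_eq_no_prefix part.toList "reason".toList hmem
    have h2 : ¬ PySem.Str.startswith part "path=" = true := by
      rw [PySem.Str.startswith_eq, PySem.Chars.startswith_iff,
          show ("path=" : String).toList = "path".toList ++ ['='] by decide]
      exact no_eq_no_prefix part.toList "path".toList hmem
    rw [if_neg h1, if_neg h2]

-- loop invariant: A's running pair is exactly the two lookups in B's running dict
theorem loop_eq (parts : List String) : ∀ (d : PySem.Dict String String),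
    parts.foldl stepA (d.getD "reason" "policy_denied", d.get? "path")
      = ((parts.foldl stepB d).getD "reason" "policy_denied",
         (parts.foldl stepB d).get? "path") := by
  induction parts with
  | nil => intro d; rfl
  | cons part rest ih =>
    intro d
    rw [List.foldl_cons, List.foldl_cons, step_eq d part]
    exact ih (stepB d part)

-- ===== VERDICT (by name: the statement is the Claim_ definition above) =====
theorem parse_benchmark_denial_message_spec : Claim_equal_parse_benchmark_denial_message := by
  intro message _
  show parse_benchmark_denial_message message = parse_benchmark_denial_message_alt message
  have h := loop_eq (PySem.Str.split₀ message) PySem.Dict.empty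
  rw [PySem.Dict.getD_empty, PySem.Dict.get?_empty] at h
  exact h
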